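-- pv_equiv track=rewrite | github.com/evanzilin/Scraping-Automated-pipeline | check_email_dup copy.py | _resolve_personal_email_columns
-- ===== SOURCE A (Python) =====
-- from typing import Any, Dict, List, Optional, Tuple, cast
--
-- _EMAIL_COLUMN_PRIORITY: Tuple[str, ...] = (
--     "person_email",
--     "person_email_analyzed",
--     "personal_email",
--     "email",
-- )
--
-- def _resolve_personal_email_columns(headers: List[str]) -> List[int]:
--     """0-based column indices for each present header in ``_EMAIL_COLUMN_PRIORITY`` (no duplicates)."""
--     found: List[int] = []
--     used: set[int] = set()
--     for want in _EMAIL_COLUMN_PRIORITY: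
--         for i, h in enumerate(headers):
--             if h == want and i not in used:
--                 found.append(i)
--                 used.add(i)
--                 break
--     return found
-- ===== SOURCE B (Python) =====
-- from typing import List, Tuple
--
-- _EMAIL_COLUMN_PRIORITY: Tuple[str, ...] = (
--     "person_email",
--     "person_email_analyzed",
--     "personal_email",
--     "email",
-- )
--
-- def _resolve_personal_email_columns(headers: List[str]) -> List[int]:
--     """Build a first-occurrence index of the headers once, then look up the priority names."""
--     first = {}
--     for i, h in enumerate(headers):
--         if h not in first:
--             first[h] = i
--     return [first[w] for w in _EMAIL_COLUMN_PRIORITY if w in first]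
-- ===== Notes on version B (the rewrite author's own statement) =====
-- stated objective: simpler
-- what changed: Instead of scanning headers from the start for each priority name while tracking a 'used' set (redundant since the priority names are distinct), B makes one pass over headers building a first-occurrence map and then resolves the priority tuple by direct lookups.
import Mathlib
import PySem

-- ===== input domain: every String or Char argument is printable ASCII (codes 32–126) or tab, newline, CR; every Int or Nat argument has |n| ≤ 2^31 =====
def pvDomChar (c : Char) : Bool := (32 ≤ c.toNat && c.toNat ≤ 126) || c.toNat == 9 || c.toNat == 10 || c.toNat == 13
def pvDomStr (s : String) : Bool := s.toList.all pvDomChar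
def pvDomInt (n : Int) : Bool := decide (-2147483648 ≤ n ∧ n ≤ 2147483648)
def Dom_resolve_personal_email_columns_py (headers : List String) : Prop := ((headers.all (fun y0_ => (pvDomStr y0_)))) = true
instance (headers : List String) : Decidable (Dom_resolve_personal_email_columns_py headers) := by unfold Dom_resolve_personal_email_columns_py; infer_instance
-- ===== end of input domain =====

-- B replaces A's per-priority-name rescans of headers (with a redundant 'used' set) by one
-- first-occurrence index built in a single pass over headers, then direct lookups (objective: simpler).

-- the module constant _EMAIL_COLUMN_PRIORITY (shared context of both programs)
def pvPriority : List String :=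
  ["person_email", "person_email_analyzed", "personal_email", "email"]

-- ===== PORT A =====
-- inner 'for i, h in enumerate(headers): if h == want and i not in used: … break'
def pvInnerA (want : String) (used : PySem.Set Int) (i : Int) : List String → Option Int
  | [] => none
  | h :: rest =>
      if h = want ∧ used.contains i = false then some i
      else pvInnerA want used (i + 1) rest

-- outer 'for want in _EMAIL_COLUMN_PRIORITY' carrying (found, used)
def pvOuterA (headers : List String) : List String → List Int × PySem.Set Int → List Int × PySem.Set Int
  | [], st => st
  | w :: ws, (found, used) =>
      match pvInnerA w used 0 headers with
      | some i => pvOuterA headers ws (found ++ [i], used.add i)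
      | none => pvOuterA headers ws (found, used)

def resolve_personal_email_columns_py (headers : List String) : List Int :=
  (pvOuterA headers pvPriority ([], PySem.Set.empty)).1

-- ===== PORT B =====
-- 'for i, h in enumerate(headers): if h not in first: first[h] = i'
def pvBuildIdx (d : PySem.Dict String Int) (i : Int) : List String → PySem.Dict String Int
  | [] => d
  | h :: rest => pvBuildIdx (if d.contains h then d else d.insert h i) (i + 1) rest

-- '[first[w] for w in _EMAIL_COLUMN_PRIORITY if w in first]'
def resolve_personal_email_columns_py_alt (headers : List String) : List Int :=
  let first := pvBuildIdx PySem.Dict.empty 0 headers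
  pvPriority.filterMap (fun w => first.get? w)

-- ===== PRECONDITION & SPEC =====
def Spec_resolve_personal_email_columns_py (headers : List String) (out : List Int) : Prop := out = resolve_personal_email_columns_py_alt headers
instance (headers : List String) (out : List Int) : Decidable (Spec_resolve_personal_email_columns_py headers out) := by unfold Spec_resolve_personal_email_columns_py; infer_instance

-- ===== CLAIM (what is proved, stated in full; the proofs are below) =====
def Claim_equal_resolve_personal_email_columns_py : Prop := ∀ (headers : List String), Dom_resolve_personal_email_columns_py headers → Spec_resolve_personal_email_columns_py headers (resolve_personal_email_columns_py headers)

-- ===== LEMMAS AND PROOFS =====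

-- proof-side helper: first index ≥ i at which 'want' occurs
def pvFirst (want : String) (i : Int) : List String → Option Int
  | [] => none
  | h :: rest => if h = want then some i else pvFirst want (i + 1) rest

theorem pvInnerA_eq_first (want : String) (used : PySem.Set Int) (hs : List String) :
    ∀ i : Int, (∀ k : ℕ, hs[k]? = some want → (i + (k : Int)) ∉ used) →
    pvInnerA want used i hs = pvFirst want i hs := by
  induction hs with
  | nil => intro i _; rfl
  | cons h rest ih =>
    intro i H
    by_cases hw : h = want
    · have h0 : i ∉ used := by
        have := H 0 (by simp [hw]); simpa using this
      simp [pvInnerA, pvFirst, hw, h0]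
    · have H' : ∀ k : ℕ, rest[k]? = some want → ((i + 1) + (k : Int)) ∉ used := by
        intro k hk
        have := H (k + 1) (by simpa using hk)
        have e : i + ((k : Int) + 1) = (i + 1) + (k : Int) := by ring
        simpa [e, Nat.cast_add] using this
      simp [pvInnerA, pvFirst, hw, ih _ H']

theorem pvFirst_some (want : String) (hs : List String) :
    ∀ i j : Int, pvFirst want i hs = some j →
    ∃ k : ℕ, j = i + (k : Int) ∧ hs[k]? = some want := by
  induction hs with
  | nil => intro i j h; simp [pvFirst] at h
  | cons h rest ih =>
    intro i j hj
    by_cases hw : h = want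
    · refine ⟨0, ?_, by simp [hw]⟩
      simp [pvFirst, hw] at hj; omega
    · simp [pvFirst, hw] at hj
      obtain ⟨k, hk, hm⟩ := ih _ _ hj
      exact ⟨k + 1, by push_cast; omega, by simpa using hm⟩

theorem pvBuildIdx_get? (w : String) (hs : List String) :
    ∀ (d : PySem.Dict String Int) (i : Int),
    (pvBuildIdx d i hs).get? w = (d.get? w).or (pvFirst w i hs) := by
  induction hs with
  | nil => intro d i; cases hd : d.get? w <;> simp [pvBuildIdx, pvFirst, hd]
  | cons h rest ih =>
    intro d i
    by_cases hc : d.contains h = true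
    · by_cases hw : h = w
      · subst hw
        obtain ⟨v, hv⟩ : ∃ v, d.get? h = some v := by
          rcases hv : d.get? h with _ | v
          · rw [PySem.Dict.get?_eq_none_iff_contains] at hv; simp [hv] at hc
          · exact ⟨v, rfl⟩
        simp [pvBuildIdx, hc, ih, pvFirst, hv]
      · simp [pvBuildIdx, hc, ih, pvFirst, hw]
    · have hn : d.get? h = none := by
        rw [PySem.Dict.get?_eq_none_iff_contains]; simpa using hc
      by_cases hw : h = w
      · subst hw
        simp [pvBuildIdx, hc, ih, pvFirst, PySem.Dict.get?_insert_self, hn]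
      · have hw' : w ≠ h := fun he => hw he.symm
        simp [pvBuildIdx, hc, ih, pvFirst, hw, PySem.Dict.get?_insert, hw']

theorem pvOuterA_eq (headers : List String) :
    ∀ (ws : List String) (found : List Int) (used : PySem.Set Int),
    ws.Nodup →
    (∀ w ∈ ws, ∀ k : ℕ, headers[k]? = some w → ((k : Int)) ∉ used) →
    (pvOuterA headers ws (found, used)).1 =
      found ++ ws.filterMap (fun w => pvFirst w 0 headers) := by
  intro ws
  induction ws with
  | nil => intro found used _ _; simp [pvOuterA]
  | cons w ws ih =>
    intro found used hnd H
    have hw : ∀ k : ℕ, headers[k]? = some w → ((0 : Int) + (k : Int)) ∉ used := by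
      intro k hk; simpa using H w (by simp) k hk
    have hinner : pvInnerA w used 0 headers = pvFirst w 0 headers :=
      pvInnerA_eq_first w used headers 0 hw
    rcases hf : pvFirst w 0 headers with _ | j
    · have := ih found used hnd.of_cons (fun w' hw' => H w' (by simp [hw']))
      simp [pvOuterA, hinner, hf, this]
    · obtain ⟨k₀, hj, hk₀⟩ := pvFirst_some w headers 0 j hf
      have H' : ∀ w' ∈ ws, ∀ k : ℕ, headers[k]? = some w' →
          ((k : Int)) ∉ PySem.Set.add used j := by
        intro w' hw' k hk
        have hne : w ≠ w' := by
          rintro rfl; exact (List.nodup_cons.mp hnd).1 hw'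
        have h1 : (k : Int) ∉ used := H w' (by simp [hw']) k hk
        have h2 : (k : Int) ≠ j := by
          intro he
          have : k = k₀ := by omega
          subst this
          rw [hk] at hk₀; exact hne (Option.some.inj hk₀).symm
        rw [PySem.Set.mem_add]
        rintro (hm | hm)
        · exact h1 hm
        · exact h2 hm
      have := ih (found ++ [j]) (used.add j) hnd.of_cons H'
      simp [pvOuterA, hinner, hf, this]

theorem priority_nodup : pvPriority.Nodup := by decide

theorem alt_eq_filterMap (headers : List String) :
    resolve_personal_email_columns_py_alt headers =
      pvPriority.filterMap (fun w => pvFirst w 0 headers) := by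
  unfold resolve_personal_email_columns_py_alt
  simp only []
  apply List.filterMap_congr
  intro w _
  rw [pvBuildIdx_get? w headers PySem.Dict.empty 0]
  simp

-- ===== VERDICT (by name: the statement is the Claim_ definition above) =====
theorem resolve_personal_email_columns_py_spec : Claim_equal_resolve_personal_email_columns_py := by
  intro headers _
  unfold Spec_resolve_personal_email_columns_py resolve_personal_email_columns_py
  rw [alt_eq_filterMap]
  have := pvOuterA_eq headers pvPriority [] PySem.Set.empty priority_nodup
    (by intro w _ k _; simp [PySem.Set.empty])
  simpa using this
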